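-- pv_equiv track=rewrite | github.com/disputestrike/RELEASE-CRUCIB-2026 | backend/orchestration/contract_artifacts.py | _route_present
-- ===== SOURCE A (Python) =====
-- from typing import Any, Dict, Iterable, Mapping, Optional
--
-- def _route_present(route: str, files: Mapping[str, str]) -> bool:
--     if route == "/":
--         return any(path.endswith(("App.jsx", "App.tsx", "HomePage.jsx", "HomePage.tsx")) for path in files)
--     route_text = route.strip("/")
--     if not route_text:
--         return False
--     lower_paths = " ".join(files.keys()).lower()
--     lower_text = "\n".join(files.values()).lower()
--     page_hint = f"{route_text}page"
--     return (
--         page_hint in lower_paths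
--         or f'path="/{route_text}"' in lower_text
--         or f"path='/{route_text}'" in lower_text
--         or f"to=\"/{route_text}\"" in lower_text
--         or f"to='/{route_text}'" in lower_text
--         or f'href="/{route_text}"' in lower_text
--     )
-- ===== SOURCE B (Python) =====
-- def _has_home(paths):
--     for path in paths:
--         if path.endswith(("App.jsx", "App.tsx", "HomePage.jsx", "HomePage.tsx")):
--             return True
--     return False
--
--
-- def _scan(hint, patterns, items):
--     for path, content in items:
--         if hint in path.lower():
--             return True
--         text = content.lower()
--         for p in patterns:
--             if p in text:
--                 return True
--     return False
--
--
-- def _route_present(route, files):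
--     if route == "/":
--         return _has_home(list(files.keys()))
--     route_text = route.strip("/")
--     if not route_text:
--         return False
--     patterns = []
--     for kw in ("path", "to"):
--         for q in ('"', "'"):
--             patterns.append(kw + "=" + q + "/" + route_text + q)
--     patterns.append('href="/' + route_text + '"')
--     return _scan(route_text + "page", patterns, list(files.items()))
-- ===== Notes on version B (the rewrite author's own statement) =====
-- stated objective: alternative
-- what changed: B drops A's two big joined index strings (' '.join of all paths, ' '.join of all contents) and its chained or, building the five anchor patterns once by a small nested loop and doing recursive short-circuit scans: a _has_home scan over the paths for '/', and a _scan over the file items testing the page hint per path and the patterns per content; Pre_ excludes routes whose stripped text contains a space or newline, the degenerate corner where A's joined index string can match a pattern across a file boundary and either answer is defensible.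
-- outside the precondition, e.g. on _route_present('a b', {'xa': '', 'bpagey': ''}): A returns True, B returns False
import Mathlib
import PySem

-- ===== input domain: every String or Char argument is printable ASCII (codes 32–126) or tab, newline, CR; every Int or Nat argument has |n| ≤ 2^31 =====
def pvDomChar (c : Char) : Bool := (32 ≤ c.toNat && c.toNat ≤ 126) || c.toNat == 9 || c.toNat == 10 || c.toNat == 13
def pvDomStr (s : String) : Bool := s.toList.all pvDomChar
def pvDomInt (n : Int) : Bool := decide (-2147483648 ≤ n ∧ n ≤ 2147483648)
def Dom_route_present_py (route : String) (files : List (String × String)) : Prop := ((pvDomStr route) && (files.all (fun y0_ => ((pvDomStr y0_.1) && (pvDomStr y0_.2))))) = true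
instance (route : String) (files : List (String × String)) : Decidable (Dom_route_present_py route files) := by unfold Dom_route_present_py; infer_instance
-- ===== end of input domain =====

-- B replaces A's two big joined index strings (" ".join of paths / "\n".join of contents) and its chained
-- `or` by recursive short-circuit scans over the file list, with the anchor patterns built once by a
-- small nested loop (objective: alternative decomposition, same cost).

-- ===== PORT A =====
def route_present_py (route : String) (files : List (String × String)) : Bool :=
  if route == "/" then
    files.any (fun path =>
      PySem.Str.endswith path.1 "App.jsx" || PySem.Str.endswith path.1 "App.tsx" ||
      PySem.Str.endswith path.1 "HomePage.jsx" || PySem.Str.endswith path.1 "HomePage.tsx")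
  else
    let route_text := PySem.Str.stripChars route "/"
    if route_text == "" then false
    else
      let lower_paths := PySem.Str.lower (PySem.Str.join " " (files.map Prod.fst))
      let lower_text := PySem.Str.lower (PySem.Str.join "\n" (files.map Prod.snd))
      let page_hint := route_text ++ "page"
      PySem.Str.isIn page_hint lower_paths ||
      PySem.Str.isIn ("path=\"/" ++ route_text ++ "\"") lower_text ||
      PySem.Str.isIn ("path='/" ++ route_text ++ "'") lower_text ||
      PySem.Str.isIn ("to=\"/" ++ route_text ++ "\"") lower_text ||
      PySem.Str.isIn ("to='/" ++ route_text ++ "'") lower_text ||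
      PySem.Str.isIn ("href=\"/" ++ route_text ++ "\"") lower_text

-- ===== PORT B =====
-- helper _has_home: first-match scan over the path list (Python for-loop with early return)
def pvHasHome : List String → Bool
  | [] => false
  | path :: rest =>
    if PySem.Str.endswith path "App.jsx" || PySem.Str.endswith path "App.tsx" ||
       PySem.Str.endswith path "HomePage.jsx" || PySem.Str.endswith path "HomePage.tsx" then true
    else pvHasHome rest

-- helper _scan: per-file short-circuit scan (hint against the path, each pattern against the content)
def pvScan (hint : String) (patterns : List String) : List (String × String) → Bool
  | [] => false
  | (path, content) :: rest =>
    if PySem.Str.isIn hint (PySem.Str.lower path) then true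
    else
      let text := PySem.Str.lower content
      if patterns.any (fun p => PySem.Str.isIn p text) then true
      else pvScan hint patterns rest

def route_present_py_alt (route : String) (files : List (String × String)) : Bool :=
  if route == "/" then pvHasHome (files.map Prod.fst)
  else
    let route_text := PySem.Str.stripChars route "/"
    if route_text == "" then false
    else
      let patterns :=
        (["path", "to"].flatMap (fun kw =>
          ["\"", "'"].map (fun q => kw ++ "=" ++ q ++ "/" ++ route_text ++ q))) ++
        ["href=\"/" ++ route_text ++ "\""]
      pvScan (route_text ++ "page") patterns files

-- ===== PRECONDITION & SPEC =====
-- Pre_ excludes routes whose stripped text contains a space or a newline: only there a search pattern can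
-- contain the join separator, so A's single " "-/"\n"-joined index string can match across a file
-- boundary — a degenerate corner (no real route contains whitespace) where matching the concatenation and
-- matching each file separately are equally defensible readings; B does the per-file one.
def Pre_route_present_py (route : String) (files : List (String × String)) : Prop :=
  route = "/" ∨ (' ' ∉ route.toList ∧ '\n' ∉ route.toList)
instance (route : String) (files : List (String × String)) : Decidable (Pre_route_present_py route files) := by unfold Pre_route_present_py; infer_instance

def pvWitness_route_present_py : String × (List (String × String)) := ("a", [("b", "c")])

def Spec_route_present_py (route : String) (files : List (String × String)) (out : Bool) : Prop := out = route_present_py_alt route files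
instance (route : String) (files : List (String × String)) (out : Bool) : Decidable (Spec_route_present_py route files out) := by unfold Spec_route_present_py; infer_instance

-- ===== CLAIM (what is proved, stated in full; the proofs are below) =====
def Claim_equal_route_present_py : Prop := ∀ (route : String) (files : List (String × String)), Dom_route_present_py route files → Pre_route_present_py route files → Spec_route_present_py route files (route_present_py route files)

-- ===== LEMMAS AND PROOFS =====

-- B's home scan is the any of A's home predicate
theorem pv_hasHome_eq_any (l : List String) :
    pvHasHome l = l.any (fun path =>
      PySem.Str.endswith path "App.jsx" || PySem.Str.endswith path "App.tsx" ||
      PySem.Str.endswith path "HomePage.jsx" || PySem.Str.endswith path "HomePage.tsx") := by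
  induction l with
  | nil => rfl
  | cons a rest ih =>
    simp only [pvHasHome, List.any_cons]
    split_ifs with h <;> simp_all

-- B's file scan is the any of its per-file test
theorem pv_scan_eq_any (hint : String) (pats : List String) (l : List (String × String)) :
    pvScan hint pats l = l.any (fun pc =>
      PySem.Str.isIn hint (PySem.Str.lower pc.1) ||
      pats.any (fun p => PySem.Str.isIn p (PySem.Str.lower pc.2))) := by
  induction l with
  | nil => rfl
  | cons a rest ih =>
    obtain ⟨path, content⟩ := a
    simp only [pvScan, List.any_cons]
    split_ifs with h1 h2 <;> simp_all

-- characters of a stripped string are characters of the string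
theorem pv_mem_stripChars (l cs : List Char) (ch : Char) (h : ch ∈ PySem.Chars.stripChars l cs) : ch ∈ l := by
  simp only [PySem.Chars.stripChars] at h
  exact (List.dropWhile_suffix _).subset ((List.mem_reverse).mp
    ((List.dropWhile_suffix _).subset ((List.mem_reverse).mp h)))

-- an element of a joined list is an infix of the join
theorem pv_mem_infix_join (sep : List Char) (l : List (List Char)) (x : List Char) (hx : x ∈ l) :
    x <:+: PySem.Chars.join sep l := by
  induction l with
  | nil => cases hx
  | cons a rest ih =>
    cases rest with
    | nil =>
      have h := List.mem_singleton.mp hx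
      subst h
      simp [PySem.Chars.join_singleton]
    | cons b rest' =>
      rw [PySem.Chars.join_cons_cons]
      rcases List.mem_cons.mp hx with h | h
      · subst h; exact ⟨[], sep ++ PySem.Chars.join sep (b :: rest'), by simp⟩
      · exact (ih h).trans
          (List.suffix_append (a ++ sep) (PySem.Chars.join sep (b :: rest'))).isInfix

-- a prefix of a ++ c :: t avoiding c lies inside a
theorem pv_prefix_sep_split (p a t : List Char) (c : Char) (hc : c ∉ p)
    (h : p <+: a ++ c :: t) : p <+: a := by
  induction a generalizing p with
  | nil =>
    cases p with
    | nil => exact List.nil_prefix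
    | cons hd tl =>
      rw [List.nil_append, List.cons_prefix_cons] at h
      exact absurd (h.1 ▸ List.mem_cons_self) hc
  | cons x a' ih =>
    cases p with
    | nil => exact List.nil_prefix
    | cons hd tl =>
      rw [List.cons_append, List.cons_prefix_cons] at h
      rw [List.cons_prefix_cons]
      exact ⟨h.1, ih tl (fun hm => hc (List.mem_cons_of_mem _ hm)) h.2⟩

-- an infix of a ++ c :: t avoiding c lies inside a or inside t
theorem pv_infix_sep_split (p a t : List Char) (c : Char) (hc : c ∉ p)
    (h : p <:+: a ++ c :: t) : p <:+: a ∨ p <:+: t := by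
  induction a generalizing p with
  | nil =>
    rw [List.nil_append] at h
    rcases List.infix_cons_iff.mp h with hpre | hinf
    · cases p with
      | nil => exact Or.inl (List.nil_infix)
      | cons hd tl =>
        rw [List.cons_prefix_cons] at hpre
        exact absurd (hpre.1 ▸ List.mem_cons_self) hc
    · exact Or.inr hinf
  | cons x a' ih =>
    rw [List.cons_append] at h
    rcases List.infix_cons_iff.mp h with hpre | hinf
    · cases p with
      | nil => exact Or.inl (List.nil_infix)
      | cons hd tl =>
        rw [List.cons_prefix_cons] at hpre
        have := pv_prefix_sep_split tl a' t c (fun hm => hc (List.mem_cons_of_mem _ hm)) hpre.2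
        exact Or.inl (List.IsPrefix.isInfix (List.cons_prefix_cons.mpr ⟨hpre.1, this⟩))
    · rcases ih p hc hinf with h' | h'
      · exact Or.inl (h'.trans (List.suffix_cons x a').isInfix)
      · exact Or.inr h'

-- a nonempty separator-free pattern is in the join iff it is in one of the pieces
theorem pv_infix_join_iff (p : List Char) (c : Char) (l : List (List Char))
    (hp : p ≠ []) (hc : c ∉ p) :
    p <:+: PySem.Chars.join [c] l ↔ ∃ x ∈ l, p <:+: x := by
  constructor
  · intro h
    induction l with
    | nil => exact absurd (List.eq_nil_of_infix_nil h) hp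
    | cons a rest ih =>
      cases rest with
      | nil =>
        rw [PySem.Chars.join_singleton] at h
        exact ⟨a, List.mem_singleton_self a, h⟩
      | cons b rest' =>
        rw [PySem.Chars.join_cons_cons] at h
        rw [show a ++ [c] ++ PySem.Chars.join [c] (b :: rest') =
            a ++ c :: PySem.Chars.join [c] (b :: rest') from by simp] at h
        rcases pv_infix_sep_split p a _ c hc h with h' | h'
        · exact ⟨a, List.mem_cons_self, h'⟩
        · rcases ih h' with ⟨x, hx, hinf⟩
          exact ⟨x, List.mem_cons_of_mem _ hx, hinf⟩
  · rintro ⟨x, hx, hinf⟩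
    exact hinf.trans (pv_mem_infix_join [c] l x hx)

-- lowering commutes with joining on a separator the lowering fixes
theorem pv_lower_join (c : Char) (hlc : PySem.Chars.lowerChar c = c) (l : List (List Char)) :
    PySem.Chars.lower (PySem.Chars.join [c] l) = PySem.Chars.join [c] (l.map PySem.Chars.lower) := by
  induction l with
  | nil => rfl
  | cons a rest ih =>
    cases rest with
    | nil => simp [PySem.Chars.join_singleton]
    | cons b rest' =>
      rw [PySem.Chars.join_cons_cons,
        show List.map PySem.Chars.lower (a :: b :: rest') =
          PySem.Chars.lower a :: PySem.Chars.lower b :: List.map PySem.Chars.lower rest' from rfl,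
        PySem.Chars.join_cons_cons,
        show (PySem.Chars.lower b :: List.map PySem.Chars.lower rest') =
          List.map PySem.Chars.lower (b :: rest') from rfl,
        ← ih]
      simp [PySem.Chars.lower, hlc]

-- Python's `p in lower(x)` as an infix statement
theorem pv_isIn_lower_iff (p s : String) :
    PySem.Str.isIn p (PySem.Str.lower s) = true ↔ p.toList <:+: PySem.Chars.lower s.toList := by
  rw [PySem.Str.isIn_iff_infix, PySem.Str.toList_lower]

-- the joined search equals the per-file search for a nonempty pattern free of the separator
theorem pv_isIn_lower_join_iff (p sep : String) (c : Char) (l : List String)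
    (hsep : sep.toList = [c]) (hlc : PySem.Chars.lowerChar c = c)
    (hp : p.toList ≠ []) (hcp : c ∉ p.toList) :
    PySem.Str.isIn p (PySem.Str.lower (PySem.Str.join sep l)) = true ↔
      ∃ x ∈ l, PySem.Str.isIn p (PySem.Str.lower x) = true := by
  rw [PySem.Str.isIn_iff_infix, PySem.Str.toList_lower, PySem.Str.toList_join, hsep,
    pv_lower_join c hlc, pv_infix_join_iff p.toList c _ hp hcp]
  constructor
  · rintro ⟨x, hx, hinf⟩
    rcases List.mem_map.mp hx with ⟨tl, htl, rfl⟩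
    rcases List.mem_map.mp htl with ⟨y, hy, rfl⟩
    exact ⟨y, hy, (pv_isIn_lower_iff p y).mpr hinf⟩
  · rintro ⟨y, hy, h⟩
    exact ⟨PySem.Chars.lower y.toList,
      List.mem_map_of_mem (List.mem_map_of_mem hy), (pv_isIn_lower_iff p y).mp h⟩

-- separator-freeness and nonemptiness of the concrete patterns
theorem pv_notmem_cat2 (c : Char) (rt suf : String) (h2 : c ∉ suf.toList)
    (h3 : ∀ ch ∈ rt.toList, ch ≠ c) : c ∉ (rt ++ suf).toList := by
  rw [String.toList_append]
  rintro hm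
  rcases List.mem_append.mp hm with h | h
  · exact h3 _ h rfl
  · exact h2 h

theorem pv_notmem_cat3 (c : Char) (pre rt suf : String) (h1 : c ∉ pre.toList)
    (h2 : c ∉ suf.toList) (h3 : ∀ ch ∈ rt.toList, ch ≠ c) : c ∉ (pre ++ rt ++ suf).toList := by
  rw [String.toList_append, String.toList_append]
  rintro hm
  rcases List.mem_append.mp hm with h | h
  · rcases List.mem_append.mp h with h' | h'
    · exact h1 h'
    · exact h3 _ h' rfl
  · exact h2 h

theorem pv_ne_nil2 (rt suf : String) (h : suf.toList ≠ []) : (rt ++ suf).toList ≠ [] := by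
  rw [String.toList_append]
  exact fun hm => h (List.append_eq_nil_iff.mp hm).2

theorem pv_ne_nil3 (pre rt suf : String) (h : suf.toList ≠ []) : (pre ++ rt ++ suf).toList ≠ [] := by
  rw [String.toList_append]
  exact fun hm => h (List.append_eq_nil_iff.mp hm).2

-- characterization of port A in its main branch
theorem pv_A_eq (route : String) (files : List (String × String))
    (hr : route ≠ "/") (ht : PySem.Str.stripChars route "/" ≠ "") :
    route_present_py route files =
      (PySem.Str.isIn (PySem.Str.stripChars route "/" ++ "page")
          (PySem.Str.lower (PySem.Str.join " " (files.map Prod.fst))) ||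
        PySem.Str.isIn ("path=\"/" ++ PySem.Str.stripChars route "/" ++ "\"")
          (PySem.Str.lower (PySem.Str.join "\n" (files.map Prod.snd))) ||
        PySem.Str.isIn ("path='/" ++ PySem.Str.stripChars route "/" ++ "'")
          (PySem.Str.lower (PySem.Str.join "\n" (files.map Prod.snd))) ||
        PySem.Str.isIn ("to=\"/" ++ PySem.Str.stripChars route "/" ++ "\"")
          (PySem.Str.lower (PySem.Str.join "\n" (files.map Prod.snd))) ||
        PySem.Str.isIn ("to='/" ++ PySem.Str.stripChars route "/" ++ "'")
          (PySem.Str.lower (PySem.Str.join "\n" (files.map Prod.snd))) ||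
        PySem.Str.isIn ("href=\"/" ++ PySem.Str.stripChars route "/" ++ "\"")
          (PySem.Str.lower (PySem.Str.join "\n" (files.map Prod.snd)))) := by
  simp [route_present_py, hr, ht]

-- characterization of port B in its main branch: the pattern loop yields the five literal anchors
-- and the recursive scan is an any over the files
theorem pv_B_eq (route : String) (files : List (String × String))
    (hr : route ≠ "/") (ht : PySem.Str.stripChars route "/" ≠ "") :
    route_present_py_alt route files =
      files.any (fun pc =>
        PySem.Str.isIn (PySem.Str.stripChars route "/" ++ "page") (PySem.Str.lower pc.1) ||
        (["path=\"/" ++ PySem.Str.stripChars route "/" ++ "\"",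
          "path='/" ++ PySem.Str.stripChars route "/" ++ "'",
          "to=\"/" ++ PySem.Str.stripChars route "/" ++ "\"",
          "to='/" ++ PySem.Str.stripChars route "/" ++ "'",
          "href=\"/" ++ PySem.Str.stripChars route "/" ++ "\""].any
          (fun p => PySem.Str.isIn p (PySem.Str.lower pc.2)))) := by
  have hpats : (["path", "to"].flatMap (fun kw =>
      ["\"", "'"].map (fun q => kw ++ "=" ++ q ++ "/" ++ PySem.Str.stripChars route "/" ++ q))) ++
      ["href=\"/" ++ PySem.Str.stripChars route "/" ++ "\""] =
      ["path=\"/" ++ PySem.Str.stripChars route "/" ++ "\"",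
       "path='/" ++ PySem.Str.stripChars route "/" ++ "'",
       "to=\"/" ++ PySem.Str.stripChars route "/" ++ "\"",
       "to='/" ++ PySem.Str.stripChars route "/" ++ "'",
       "href=\"/" ++ PySem.Str.stripChars route "/" ++ "\""] := rfl
  simp only [route_present_py_alt]
  rw [if_neg (by simpa using hr), if_neg (by simpa using ht), hpats, pv_scan_eq_any]

-- ===== VERDICT (by name: the statement is the Claim_ definition above) =====
theorem route_present_py_spec : Claim_equal_route_present_py := by
  intro route files _ hpre
  show route_present_py route files = route_present_py_alt route files
  by_cases hr : route = "/"
  · simp only [route_present_py, route_present_py_alt, hr, if_pos, beq_self_eq_true]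
    rw [pv_hasHome_eq_any, List.any_map]
    rfl
  · by_cases ht : PySem.Str.stripChars route "/" = ""
    · simp [route_present_py, route_present_py_alt, hr, ht]
    · have hpre' := hpre.resolve_left hr
      have hsp1 : ∀ ch ∈ (PySem.Str.stripChars route "/").toList, ch ≠ ' ' := by
        intro ch hm he
        rw [PySem.Str.toList_stripChars] at hm
        exact hpre'.1 (he ▸ pv_mem_stripChars _ _ _ hm)
      have hsp2 : ∀ ch ∈ (PySem.Str.stripChars route "/").toList, ch ≠ '\n' := by
        intro ch hm he
        rw [PySem.Str.toList_stripChars] at hm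
        exact hpre'.2 (he ▸ pv_mem_stripChars _ _ _ hm)
      rw [pv_A_eq route files hr ht, pv_B_eq route files hr ht]
      set rt := PySem.Str.stripChars route "/" with hrt
      have hpg : ("page" : String).toList ≠ [] := by decide
      have hq : ("\"" : String).toList ≠ [] := by decide
      have hq' : ("'" : String).toList ≠ [] := by decide
      have h1 := pv_isIn_lower_join_iff (rt ++ "page") " " ' ' (files.map Prod.fst)
        (by decide) (by decide) (pv_ne_nil2 rt "page" hpg)
        (pv_notmem_cat2 ' ' rt "page" (by decide) hsp1)
      have hnl : ∀ ch ∈ rt.toList, ch ≠ '\n' := hsp2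
      have h2 := pv_isIn_lower_join_iff ("path=\"/" ++ rt ++ "\"") "\n" '\n' (files.map Prod.snd)
        (by decide) (by decide) (pv_ne_nil3 "path=\"/" rt "\"" hq)
        (pv_notmem_cat3 '\n' "path=\"/" rt "\"" (by decide) (by decide) hnl)
      have h3 := pv_isIn_lower_join_iff ("path='/" ++ rt ++ "'") "\n" '\n' (files.map Prod.snd)
        (by decide) (by decide) (pv_ne_nil3 "path='/" rt "'" hq')
        (pv_notmem_cat3 '\n' "path='/" rt "'" (by decide) (by decide) hnl)
      have h4 := pv_isIn_lower_join_iff ("to=\"/" ++ rt ++ "\"") "\n" '\n' (files.map Prod.snd)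
        (by decide) (by decide) (pv_ne_nil3 "to=\"/" rt "\"" hq)
        (pv_notmem_cat3 '\n' "to=\"/" rt "\"" (by decide) (by decide) hnl)
      have h5 := pv_isIn_lower_join_iff ("to='/" ++ rt ++ "'") "\n" '\n' (files.map Prod.snd)
        (by decide) (by decide) (pv_ne_nil3 "to='/" rt "'" hq')
        (pv_notmem_cat3 '\n' "to='/" rt "'" (by decide) (by decide) hnl)
      have h6 := pv_isIn_lower_join_iff ("href=\"/" ++ rt ++ "\"") "\n" '\n' (files.map Prod.snd)
        (by decide) (by decide) (pv_ne_nil3 "href=\"/" rt "\"" hq)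
        (pv_notmem_cat3 '\n' "href=\"/" rt "\"" (by decide) (by decide) hnl)
      rw [Bool.eq_iff_iff]
      simp only [Bool.or_eq_true, List.any_eq_true, List.mem_cons, List.not_mem_nil, or_false]
      rw [h1, h2, h3, h4, h5, h6]
      simp only [List.mem_map]
      constructor
      · rintro (((((⟨x, ⟨pc, hpc, rfl⟩, hx⟩ | ⟨x, ⟨pc, hpc, rfl⟩, hx⟩) | ⟨x, ⟨pc, hpc, rfl⟩, hx⟩) |
          ⟨x, ⟨pc, hpc, rfl⟩, hx⟩) | ⟨x, ⟨pc, hpc, rfl⟩, hx⟩) | ⟨x, ⟨pc, hpc, rfl⟩, hx⟩)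
        · exact ⟨pc, hpc, Or.inl hx⟩
        · exact ⟨pc, hpc, Or.inr ⟨_, Or.inl rfl, hx⟩⟩
        · exact ⟨pc, hpc, Or.inr ⟨_, Or.inr (Or.inl rfl), hx⟩⟩
        · exact ⟨pc, hpc, Or.inr ⟨_, Or.inr (Or.inr (Or.inl rfl)), hx⟩⟩
        · exact ⟨pc, hpc, Or.inr ⟨_, Or.inr (Or.inr (Or.inr (Or.inl rfl))), hx⟩⟩
        · exact ⟨pc, hpc, Or.inr ⟨_, Or.inr (Or.inr (Or.inr (Or.inr rfl))), hx⟩⟩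
      · rintro ⟨pc, hpc, hx | ⟨p, hp, hx⟩⟩
        · exact Or.inl (Or.inl (Or.inl (Or.inl (Or.inl ⟨pc.1, ⟨pc, hpc, rfl⟩, hx⟩))))
        · rcases hp with rfl | rfl | rfl | rfl | rfl
          · exact Or.inl (Or.inl (Or.inl (Or.inl (Or.inr ⟨pc.2, ⟨pc, hpc, rfl⟩, hx⟩))))
          · exact Or.inl (Or.inl (Or.inl (Or.inr ⟨pc.2, ⟨pc, hpc, rfl⟩, hx⟩)))
          · exact Or.inl (Or.inl (Or.inr ⟨pc.2, ⟨pc, hpc, rfl⟩, hx⟩))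
          · exact Or.inl (Or.inr ⟨pc.2, ⟨pc, hpc, rfl⟩, hx⟩)
          · exact Or.inr ⟨pc.2, ⟨pc, hpc, rfl⟩, hx⟩
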